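-- pv_equiv track=rewrite | github.com/suh-fee/nyuCoursework | Intro to Python Labs/lab9.py | find_max_even_index
-- ===== SOURCE A (Python) =====
-- def find_max_even_index(lst):
--     length = len(lst)
--     last_even_place = -1
--     last_even = 0
--     for i in range(length):
--         if (lst[i] % 2) == 0:
--             if lst[i] > last_even:
--                 last_even_place = i
--                 last_even = lst[last_even_place]
--     return last_even_place
-- ===== SOURCE B (Python) =====
-- def find_max_even_index(lst):
--     evens = [x for x in lst if x % 2 == 0 and x > 0]
--     if not evens:
--         return -1
--     return lst.index(max(evens))
-- ===== Notes on version B (the rewrite author's own statement) =====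
-- stated objective: simpler
-- what changed: Replaces the single stateful index scan tracking (best index, best value) with a value-level decomposition: filter the positive even values, take their max, and look up its first index with lst.index; no index bookkeeping in the pass.
import Mathlib
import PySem

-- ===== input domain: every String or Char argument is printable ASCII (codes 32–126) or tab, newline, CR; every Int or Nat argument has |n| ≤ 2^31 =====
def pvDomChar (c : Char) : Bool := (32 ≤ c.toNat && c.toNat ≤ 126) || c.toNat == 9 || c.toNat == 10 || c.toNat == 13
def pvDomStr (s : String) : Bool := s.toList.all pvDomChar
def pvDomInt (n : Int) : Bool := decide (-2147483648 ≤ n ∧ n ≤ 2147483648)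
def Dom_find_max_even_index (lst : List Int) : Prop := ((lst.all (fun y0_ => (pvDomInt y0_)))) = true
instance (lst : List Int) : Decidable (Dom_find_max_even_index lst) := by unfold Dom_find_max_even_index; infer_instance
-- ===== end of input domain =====

-- B replaces A's single stateful index scan by a filter-positive-evens / max / first-index-lookup decomposition.

-- ===== PORT A =====
def find_max_even_index (lst : List Int) : Int :=
  let length : Int := (lst.length : Int)
  let st := (PySem.List.pyRange 0 length 1).foldl
    (fun (st : Int × Int) i =>
      if PySem.Int.mod (PySem.List.pyGetD lst i 0) 2 = 0 then
        if PySem.List.pyGetD lst i 0 > st.2 then (i, PySem.List.pyGetD lst i 0) else st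
      else st)
    (-1, 0)
  st.1

-- ===== PORT B =====
def find_max_even_index_alt (lst : List Int) : Int :=
  let evens := lst.filter (fun x => decide (PySem.Int.mod x 2 = 0) && decide (0 < x))
  if evens.isEmpty then -1
  else
    match PySem.List.max? evens (fun y => y) with
    | some m =>
      match PySem.List.index? lst m with
      | some k => (k : Int)
      | none => -1   -- unreachable: max(evens) is an element of lst
    | none => -1     -- unreachable: evens is nonempty here

-- ===== PRECONDITION & SPEC =====
def Spec_find_max_even_index (lst : List Int) (out : Int) : Prop := out = find_max_even_index_alt lst
instance (lst : List Int) (out : Int) : Decidable (Spec_find_max_even_index lst out) := by unfold Spec_find_max_even_index; infer_instance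

-- ===== CLAIM (what is proved, stated in full; the proofs are below) =====
def Claim_equal_find_max_even_index : Prop := ∀ (lst : List Int), Dom_find_max_even_index lst → Spec_find_max_even_index lst (find_max_even_index lst)

-- ===== LEMMAS AND PROOFS =====

-- loop body of A, on (index, value) pairs
def pvStep (st : Int × Int) (p : Int × Int) : Int × Int :=
  if PySem.Int.mod p.2 2 = 0 then
    if p.2 > st.2 then (p.1, p.2) else st
  else st

-- characterisation of A's loop over a suffix t enumerated from s, starting in state st
def pvSel (t : List Int) (s : Int) (st : Int × Int) : Int × Int :=
  match PySem.List.max? (t.filter (fun x => decide (PySem.Int.mod x 2 = 0) && decide (st.2 < x))) (fun y => y) with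
  | none => st
  | some m => (s + ((PySem.List.index? t m).getD 0 : Nat), m)

theorem max?_id_eq_some_of {xs : List Int} {m : Int} (hm : m ∈ xs) (hb : ∀ y ∈ xs, y ≤ m) :
    PySem.List.max? xs (fun y => y) = some m := by
  cases xs with
  | nil => cases hm
  | cons a t =>
    rw [PySem.List.max?_id_cons]
    have h1 := PySem.List.le_foldl_max t a
    have h2 := PySem.List.foldl_max_mem t a
    have hle : t.foldl max a ≤ m := by
      rcases h2 with h | h
      · rw [h]; exact hb a (by simp)
      · exact hb _ (by simp [h])
    have hge : m ≤ t.foldl max a := by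
      rcases (by simpa using hm : m = a ∨ m ∈ t) with h | h
      · rw [h]; exact h1.1
      · exact h1.2 m h
    simp [le_antisymm hle hge]

theorem pvIndexConsShift {t : List Int} {m x : Int} (hm : m ∈ t) (hne : x ≠ m) (s : Int) :
    s + (((PySem.List.index? (x :: t) m).getD 0 : Nat) : Int)
      = (s + 1) + (((PySem.List.index? t m).getD 0 : Nat) : Int) := by
  have h := PySem.List.index?_cons_of_ne (v := m) t hne
  rw [h]
  cases hidx : PySem.List.index? t m with
  | none => exact absurd ((PySem.List.index?_eq_none_iff t m).mp hidx) (by simp [hm])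
  | some k => simp; omega

theorem pvSel_spec (t : List Int) : ∀ (s : Int) (st : Int × Int),
    (PySem.List.enumerate t s).foldl pvStep st = pvSel t s st := by
  induction t with
  | nil => intro s st; simp [PySem.List.enumerate_nil, pvSel, PySem.List.max?]
  | cons x t ih =>
    intro s st
    rw [PySem.List.enumerate_cons, List.foldl_cons]
    by_cases hev : PySem.Int.mod x 2 = 0
    · by_cases hgt : x > st.2
      · -- x qualifies: state becomes (s, x)
        have hstep : pvStep st (s, x) = (s, x) := by
          simp only [pvStep]; rw [if_pos hev, if_pos hgt]
        rw [hstep, ih (s+1) (s, x)]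
        simp only [pvSel]
        have hfil : (x :: t).filter (fun y => decide (PySem.Int.mod y 2 = 0) && decide (st.2 < y))
            = x :: t.filter (fun y => decide (PySem.Int.mod y 2 = 0) && decide (st.2 < y)) := by
          rw [List.filter_cons, if_pos]
          simp only [Bool.and_eq_true, decide_eq_true_eq]
          exact ⟨hev, hgt⟩
        rw [hfil]
        cases hmx : PySem.List.max? (t.filter (fun y => decide (PySem.Int.mod y 2 = 0) && decide (((s, x) : Int × Int).2 < y))) (fun y => y) with
        | none =>
          have hnone : ∀ y ∈ t, PySem.Int.mod y 2 = 0 → x < y → False := by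
            intro y hy h1 h2
            have hmem : y ∈ t.filter (fun y => decide (PySem.Int.mod y 2 = 0) && decide (((s, x) : Int × Int).2 < y)) :=
              List.mem_filter.mpr ⟨hy, by simp only [Bool.and_eq_true, decide_eq_true_eq]; exact ⟨h1, h2⟩⟩
            rw [(PySem.List.max?_eq_none_iff _ _).mp hmx] at hmem
            cases hmem
          have hmax : PySem.List.max? (x :: t.filter (fun y => decide (PySem.Int.mod y 2 = 0) && decide (st.2 < y))) (fun y => y) = some x := by
            apply max?_id_eq_some_of (by simp)
            intro y hy
            rcases List.mem_cons.mp hy with h | h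
            · exact le_of_eq h
            · obtain ⟨hyt, hc⟩ := List.mem_filter.mp h
              simp only [Bool.and_eq_true, decide_eq_true_eq] at hc
              by_contra h3
              exact hnone y hyt hc.1 (by omega)
          rw [hmax]
          show ((s, x) : Int × Int) = (s + (((PySem.List.index? (x :: t) x).getD 0 : Nat) : Int), x)
          rw [PySem.List.index?_cons_self]
          simp
        | some m =>
          have hmem := PySem.List.max?_mem hmx
          have hmax' := PySem.List.max?_isMax hmx
          obtain ⟨hmt, hc⟩ := List.mem_filter.mp hmem
          simp only [Bool.and_eq_true, decide_eq_true_eq] at hc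
          obtain ⟨hmev, hxm⟩ := hc
          have hmax : PySem.List.max? (x :: t.filter (fun y => decide (PySem.Int.mod y 2 = 0) && decide (st.2 < y))) (fun y => y) = some m := by
            apply max?_id_eq_some_of
            · exact List.mem_cons.mpr (Or.inr (List.mem_filter.mpr ⟨hmt, by
                simp only [Bool.and_eq_true, decide_eq_true_eq]; exact ⟨hmev, by omega⟩⟩))
            · intro y hy
              rcases List.mem_cons.mp hy with h | h
              · omega
              · obtain ⟨hyt, hc'⟩ := List.mem_filter.mp h
                simp only [Bool.and_eq_true, decide_eq_true_eq] at hc'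
                by_cases h3 : x < y
                · exact hmax' y (List.mem_filter.mpr ⟨hyt, by
                    simp only [Bool.and_eq_true, decide_eq_true_eq]; exact ⟨hc'.1, h3⟩⟩)
                · omega
          rw [hmax]
          show ((s + 1 + (((PySem.List.index? t m).getD 0 : Nat) : Int), m) : Int × Int)
              = (s + (((PySem.List.index? (x :: t) m).getD 0 : Nat) : Int), m)
          have := pvIndexConsShift hmt (by omega : x ≠ m) s
          exact Prod.ext (by simpa using this.symm) rfl
      · -- even but not greater: state unchanged, x filtered out
        have hstep : pvStep st (s, x) = st := by
          simp only [pvStep]; rw [if_pos hev, if_neg hgt]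
        rw [hstep, ih (s+1) st]
        simp only [pvSel]
        have hfil : (x :: t).filter (fun y => decide (PySem.Int.mod y 2 = 0) && decide (st.2 < y))
            = t.filter (fun y => decide (PySem.Int.mod y 2 = 0) && decide (st.2 < y)) := by
          rw [List.filter_cons, if_neg]
          simp only [Bool.and_eq_true, decide_eq_true_eq]
          intro h; exact hgt h.2
        rw [hfil]
        cases hmx : PySem.List.max? (t.filter (fun y => decide (PySem.Int.mod y 2 = 0) && decide (st.2 < y))) (fun y => y) with
        | none => rfl
        | some m =>
          have hmem := PySem.List.max?_mem hmx
          obtain ⟨hmt, hc⟩ := List.mem_filter.mp hmem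
          simp only [Bool.and_eq_true, decide_eq_true_eq] at hc
          have hne : x ≠ m := by
            intro h; exact hgt (by omega)
          show ((s + 1 + (((PySem.List.index? t m).getD 0 : Nat) : Int), m) : Int × Int)
              = (s + (((PySem.List.index? (x :: t) m).getD 0 : Nat) : Int), m)
          have := pvIndexConsShift hmt hne s
          exact Prod.ext (by simpa using this.symm) rfl
    · -- odd: state unchanged, x filtered out
      have hstep : pvStep st (s, x) = st := by
        simp only [pvStep]; rw [if_neg hev]
      rw [hstep, ih (s+1) st]
      simp only [pvSel]
      have hfil : (x :: t).filter (fun y => decide (PySem.Int.mod y 2 = 0) && decide (st.2 < y))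
          = t.filter (fun y => decide (PySem.Int.mod y 2 = 0) && decide (st.2 < y)) := by
        rw [List.filter_cons, if_neg]
        simp only [Bool.and_eq_true, decide_eq_true_eq]
        intro h; exact hev h.1
      rw [hfil]
      cases hmx : PySem.List.max? (t.filter (fun y => decide (PySem.Int.mod y 2 = 0) && decide (st.2 < y))) (fun y => y) with
      | none => rfl
      | some m =>
        have hmem := PySem.List.max?_mem hmx
        obtain ⟨hmt, hc⟩ := List.mem_filter.mp hmem
        simp only [Bool.and_eq_true, decide_eq_true_eq] at hc
        have hne : x ≠ m := by
          intro h; rw [h] at hev; exact hev hc.1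
        show ((s + 1 + (((PySem.List.index? t m).getD 0 : Nat) : Int), m) : Int × Int)
            = (s + (((PySem.List.index? (x :: t) m).getD 0 : Nat) : Int), m)
        have := pvIndexConsShift hmt hne s
        exact Prod.ext (by simpa using this.symm) rfl

theorem find_max_even_index_eq_sel (lst : List Int) :
    find_max_even_index lst = (pvSel lst 0 (-1, 0)).1 := by
  unfold find_max_even_index
  rw [← pvSel_spec lst 0 (-1, 0)]
  rw [PySem.List.enumerate_eq_map_pyRange lst 0, List.foldl_map]
  rfl

theorem find_max_even_index_alt_eq_sel (lst : List Int) :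
    find_max_even_index_alt lst = (pvSel lst 0 (-1, 0)).1 := by
  unfold find_max_even_index_alt
  show (if (lst.filter (fun x => decide (PySem.Int.mod x 2 = 0) && decide (0 < x))).isEmpty then (-1 : Int) else _) = _
  simp only [pvSel]
  cases hmx : PySem.List.max? (lst.filter (fun x => decide (PySem.Int.mod x 2 = 0) && decide (0 < x))) (fun y => y) with
  | none =>
    have hnil := (PySem.List.max?_eq_none_iff _ _).mp hmx
    rw [hnil]
    rfl
  | some m =>
    have hmem := PySem.List.max?_mem hmx
    have hnonnil : (lst.filter (fun x => decide (PySem.Int.mod x 2 = 0) && decide (0 < x))).isEmpty = false := by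
      cases h : lst.filter (fun x => decide (PySem.Int.mod x 2 = 0) && decide (0 < x)) with
      | nil => rw [h] at hmem; cases hmem
      | cons a u => rfl
    rw [hnonnil]
    have hlst : m ∈ lst := (List.mem_filter.mp hmem).1
    simp only [Bool.false_eq_true, if_false]
    cases hidx : PySem.List.index? lst m with
    | none => exact absurd ((PySem.List.index?_eq_none_iff _ _).mp hidx) (fun h => h hlst)
    | some k => simp

-- ===== VERDICT (by name: the statement is the Claim_ definition above) =====
theorem find_max_even_index_spec : Claim_equal_find_max_even_index := by
  intro lst _
  unfold Spec_find_max_even_index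
  rw [find_max_even_index_eq_sel, find_max_even_index_alt_eq_sel]
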